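-- pv_equiv track=rewrite | github.com/daniel-reich/turbo-robot | WoPJpe3RzxGhLSXkv_15.py | concatenation_sum
-- ===== SOURCE A (Python) =====
-- def concatenation_sum(n):
--   m,d,ans=9,1,0
--   while n>0:
--     if n-m>=0:
--       ans+=d*m
--     else:
--       ans+=d*n
--     n-=m
--     d+=1
--     m*=10
--   return ans
-- ===== SOURCE B (Python) =====
-- def concatenation_sum(n):
--   if n <= 0:
--     return 0
--   d = len(str(n))
--   return d * (n + 1) - (10 ** d - 1) // 9
-- ===== Notes on version B (the rewrite author's own statement) =====
-- stated objective: simpler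
-- what changed: Replaces the digit-count bucket loop (running m,d,ans state with per-bucket branching) by the closed formula d*(n+1) - (10**d-1)//9 with d = len(str(n)).
import Mathlib
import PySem

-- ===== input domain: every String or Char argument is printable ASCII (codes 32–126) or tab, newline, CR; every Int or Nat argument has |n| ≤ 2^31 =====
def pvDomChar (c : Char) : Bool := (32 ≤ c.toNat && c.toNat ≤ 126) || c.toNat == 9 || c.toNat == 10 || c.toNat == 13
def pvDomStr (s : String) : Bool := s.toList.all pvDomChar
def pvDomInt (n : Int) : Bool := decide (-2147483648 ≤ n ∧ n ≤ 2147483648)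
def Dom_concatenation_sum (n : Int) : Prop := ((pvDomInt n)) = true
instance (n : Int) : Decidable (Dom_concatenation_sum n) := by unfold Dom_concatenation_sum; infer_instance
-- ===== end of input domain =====

-- B replaces A's powers-of-ten bucket loop (running m,d,ans state) by the closed formula
-- d*(n+1) - (10**d - 1)//9 with d = len(str(n)); same cost, simpler.

-- ===== PORT A =====
-- A's 'while n > 0' loop; the fuel Nat.toNat n + 1 is a totality guard only (each
-- iteration subtracts m ≥ 9 from n, so the loop runs at most n.toNat + 1 times).
def pvLoopA : Nat → Int → Int → Int → Int → Int
  | 0, _, _, _, ans => ans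
  | fuel+1, n, m, d, ans =>
    if n > 0 then
      pvLoopA fuel (n - m) (m * 10) (d + 1) (ans + d * (if n - m ≥ 0 then m else n))
    else ans

def concatenation_sum (n : Int) : Int := pvLoopA (n.toNat + 1) n 9 1 0

-- ===== PORT B =====
-- '10 ** d' is ported as (10 : Int) ^ d.toNat: exact, since d = len(str(n)) ≥ 1 on this branch.
def concatenation_sum_alt (n : Int) : Int :=
  if n ≤ 0 then 0
  else
    let d := PySem.Str.len (PySem.Int.toStr n)
    d * (n + 1) - PySem.Int.floordiv (10 ^ d.toNat - 1) 9

-- ===== PRECONDITION & SPEC =====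
def Spec_concatenation_sum (n : Int) (out : Int) : Prop := out = concatenation_sum_alt n
instance (n : Int) (out : Int) : Decidable (Spec_concatenation_sum n out) := by unfold Spec_concatenation_sum; infer_instance

-- ===== CLAIM (what is proved, stated in full; the proofs are below) =====
def Claim_equal_concatenation_sum : Prop := ∀ (n : Int), Dom_concatenation_sum n → Spec_concatenation_sum n (concatenation_sum n)

-- ===== LEMMAS AND PROOFS =====

-- exact digit-length of Nat.toDigitsCore with sufficient fuel
lemma pv_toDigitsCore_length (f : ℕ) : ∀ (n : ℕ) (l : List Char), 0 < n → n < 10 ^ f →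
    (Nat.toDigitsCore 10 f n l).length = l.length + Nat.log 10 n + 1 := by
  induction f with
  | zero => intro n l hn hlt; simp at hlt; omega
  | succ f ih =>
    intro n l hn hlt
    rw [Nat.toDigitsCore]
    by_cases h : n / 10 = 0
    · have hlog : Nat.log 10 n = 0 := by
        rw [Nat.log_eq_zero_iff]; left; omega
      simp [h, hlog]
    · simp only [h, if_false]
      have hdiv : 0 < n / 10 := Nat.pos_of_ne_zero h
      have hlt' : n / 10 < 10 ^ f := by
        rw [Nat.div_lt_iff_lt_mul (by norm_num : 0 < 10)]
        calc n < 10 ^ (f + 1) := hlt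
        _ = 10 ^ f * 10 := by ring
      have hge : 10 ≤ n := by
        by_contra hc
        exact h (Nat.div_eq_of_lt (by omega))
      have hlogpos : 0 < Nat.log 10 n := Nat.log_pos (by norm_num) hge
      have hld := Nat.log_div_base 10 n
      rw [ih (n / 10) _ hdiv hlt']
      simp only [List.length_cons]
      omega

-- exact length of Nat.toDigits 10
lemma pv_toDigits_length (n : ℕ) (hn : 0 < n) :
    (Nat.toDigits 10 n).length = Nat.log 10 n + 1 := by
  have h : n < 10 ^ n := Nat.lt_pow_self (by norm_num)
  have h2 : n < 10 ^ (n + 1) := lt_of_lt_of_le h (Nat.pow_le_pow_right (by norm_num) (by omega))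
  simpa using pv_toDigitsCore_length (n + 1) n [] hn h2

-- len(str(k)) for k ≥ 1
lemma pv_len_toStr (k : Int) (hk : 1 ≤ k) :
    PySem.Str.len (PySem.Int.toStr k) = (Nat.log 10 k.toNat : ℤ) + 1 := by
  have hneg : ¬ k < 0 := by omega
  have : (PySem.Int.toChars k).length = Nat.log 10 k.toNat + 1 := by
    simp only [PySem.Int.toChars, if_neg hneg]
    exact pv_toDigits_length k.toNat (by omega)
  simp only [PySem.Str.len, PySem.Int.toList_toStr, this]
  push_cast; ring

-- the digit length of 10^e + j, as an integer term
def pvDlen (e j : ℕ) : Int := (Nat.log 10 (10 ^ e + j) : ℤ) + 1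

lemma pv_dlen_const (e j : ℕ) (hj : j < 9 * 10 ^ e) : pvDlen e j = (e : ℤ) + 1 := by
  unfold pvDlen
  have : Nat.log 10 (10 ^ e + j) = e :=
    Nat.log_eq_of_pow_le_of_lt_pow (by omega) (by rw [pow_succ]; omega)
  rw [this]

-- loop invariant for A's bucket loop
lemma pv_loopA_inv (fuel : ℕ) : ∀ (n : Int) (e : ℕ) (ans : Int), n.toNat < fuel →
    pvLoopA fuel n (9 * 10 ^ e) ((e : ℤ) + 1) ans
      = ans + ((List.range n.toNat).map (pvDlen e)).sum := by
  induction fuel with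
  | zero => intro n e ans h; omega
  | succ fuel ih =>
    intro n e ans h
    rw [pvLoopA]
    by_cases hn : n > 0
    · rw [if_pos hn]
      have hm : (9 * 10 ^ e : Int) = ((9 * 10 ^ e : ℕ) : ℤ) := by push_cast; ring
      by_cases hge : n - 9 * 10 ^ e ≥ 0
      · -- full bucket: n ≥ m
        rw [if_pos hge]
        have hmul : (9 * 10 ^ e : Int) * 10 = 9 * 10 ^ (e + 1) := by ring
        have hd : ((e : ℤ) + 1) + 1 = ((e + 1 : ℕ) : ℤ) + 1 := by push_cast; ring
        have hfuel : (n - 9 * 10 ^ e).toNat < fuel := by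
          have : (0:ℤ) < 9 * 10 ^ e := by positivity
          omega
        rw [hmul, hd, ih (n - 9 * 10 ^ e) (e + 1) _ hfuel]
        have hsplit : n.toNat = 9 * 10 ^ e + (n - 9 * 10 ^ e).toNat := by
          have : (0:ℤ) < 9 * 10 ^ e := by positivity
          have h9 : ((9 * 10 ^ e : ℕ) : ℤ) = 9 * 10 ^ e := by push_cast; ring
          omega
        rw [hsplit, List.range_add, List.map_append, List.sum_append]
        have hconst : ((List.range (9 * 10 ^ e)).map (pvDlen e)).sum
            = ((e : ℤ) + 1) * (9 * 10 ^ e) := by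
          rw [List.map_congr_left (fun j hj => pv_dlen_const e j (List.mem_range.mp hj)),
            List.map_const', List.sum_replicate, List.length_range, nsmul_eq_mul]
          push_cast; ring
        have hshift : (List.map (fun x => 9 * 10 ^ e + x) (List.range (n - 9 * 10 ^ e).toNat)).map (pvDlen e)
            = (List.range (n - 9 * 10 ^ e).toNat).map (pvDlen (e + 1)) := by
          rw [List.map_map]
          apply List.map_congr_left
          intro j _
          simp only [Function.comp, pvDlen]
          have harg : 10 ^ e + (9 * 10 ^ e + j) = 10 ^ (e + 1) + j := by rw [pow_succ]; ring
          rw [harg]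
        rw [hconst, hshift]
        ring
      · -- partial bucket: 0 < n < m
        rw [if_neg hge]
        have hstop : n - 9 * 10 ^ e ≤ 0 := by omega
        have : pvLoopA fuel (n - 9 * 10 ^ e) ((9 * 10 ^ e) * 10) (((e : ℤ) + 1) + 1)
            (ans + ((e : ℤ) + 1) * n) = ans + ((e : ℤ) + 1) * n := by
          cases fuel with
          | zero => rfl
          | succ f => rw [pvLoopA, if_neg (by omega)]
        rw [this]
        have hconst : ((List.range n.toNat).map (pvDlen e)).sum = ((e : ℤ) + 1) * n := by
          have hb : n.toNat < 9 * 10 ^ e := by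
            have h9 : ((9 * 10 ^ e : ℕ) : ℤ) = 9 * 10 ^ e := by push_cast; ring
            omega
          rw [List.map_congr_left (fun j hj => pv_dlen_const e j (by
            have := List.mem_range.mp hj; omega)),
            List.map_const', List.sum_replicate, List.length_range, nsmul_eq_mul]
          have hcn : ((n.toNat : ℤ)) = n := by omega
          rw [hcn]; ring
        rw [hconst]
    · rw [if_neg hn]
      have : n.toNat = 0 := by omega
      simp [this]

-- closed form for the digit-length sum
lemma pv_closed : ∀ (n : ℕ), 0 < n →
    ((List.range n).map (pvDlen 0)).sum
      = ((Nat.log 10 n : ℤ) + 1) * ((n : ℤ) + 1)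
        - ∑ i ∈ Finset.range (Nat.log 10 n + 1), (10 : ℤ) ^ i := by
  intro n hn
  induction n, hn using Nat.le_induction with
  | base => simp [pvDlen]
  | succ n hn ih =>
    rw [List.range_succ, List.map_append, List.sum_append]
    simp only [List.map_cons, List.map_nil, List.sum_cons, List.sum_nil, add_zero]
    have h1 : 10 ^ Nat.log 10 n ≤ n := Nat.pow_log_le_self 10 (by omega)
    have h2 : n < 10 ^ (Nat.log 10 n + 1) := Nat.lt_pow_succ_log_self (by norm_num) n
    have hterm : pvDlen 0 n = (Nat.log 10 (n + 1) : ℤ) + 1 := by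
      simp [pvDlen, Nat.add_comm]
    by_cases hc : n + 1 < 10 ^ (Nat.log 10 n + 1)
    · have hlog : Nat.log 10 (n + 1) = Nat.log 10 n :=
        Nat.log_eq_of_pow_le_of_lt_pow (by omega) hc
      rw [ih, hterm, hlog]
      push_cast
      ring
    · have heq : n + 1 = 10 ^ (Nat.log 10 n + 1) := by omega
      have hlog : Nat.log 10 (n + 1) = Nat.log 10 n + 1 := by
        rw [heq, Nat.log_pow (by norm_num)]
      rw [ih, hterm, hlog, Finset.sum_range_succ (fun i => (10 : ℤ) ^ i) (Nat.log 10 n + 1)]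
      have hcast : ((10 : ℤ)) ^ (Nat.log 10 n + 1) = (n : ℤ) + 1 := by
        exact_mod_cast heq.symm
      rw [hcast]
      push_cast
      ring

-- ===== VERDICT (by name: the statement is the Claim_ definition above) =====
theorem concatenation_sum_spec : Claim_equal_concatenation_sum := by
  intro n _
  unfold Spec_concatenation_sum concatenation_sum concatenation_sum_alt
  by_cases hn : n ≤ 0
  · rw [pvLoopA, if_neg (by omega), if_pos hn]
  · rw [if_neg hn]
    have h := pv_loopA_inv (n.toNat + 1) n 0 0 (by omega)
    simp only [pow_zero, mul_one, Nat.cast_zero, zero_add] at h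
    rw [h, pv_closed n.toNat (by omega)]
    show _ = (PySem.Str.len (PySem.Int.toStr n)) * (n + 1)
      - PySem.Int.floordiv (10 ^ (PySem.Str.len (PySem.Int.toStr n)).toNat - 1) 9
    have hd : PySem.Str.len (PySem.Int.toStr n) = (Nat.log 10 n.toNat : ℤ) + 1 :=
      pv_len_toStr n (by omega)
    rw [hd]
    have hdt : ((Nat.log 10 n.toNat : ℤ) + 1).toNat = Nat.log 10 n.toNat + 1 := by omega
    rw [hdt]
    have hrep : (∑ i ∈ Finset.range (Nat.log 10 n.toNat + 1), (10 : ℤ) ^ i) * 9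
        = 10 ^ (Nat.log 10 n.toNat + 1) - 1 := by
      have := geom_sum_mul (10 : ℤ) (Nat.log 10 n.toNat + 1)
      norm_num at this
      linarith
    have hfd : PySem.Int.floordiv ((10 : ℤ) ^ (Nat.log 10 n.toNat + 1) - 1) 9
        = ∑ i ∈ Finset.range (Nat.log 10 n.toNat + 1), (10 : ℤ) ^ i := by
      rw [← hrep]
      exact Int.mul_fdiv_cancel _ (by norm_num)
    rw [hfd]
    have hcn : ((n.toNat : ℤ)) = n := by omega
    rw [hcn]
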